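-- pv_equiv track=rewrite | github.com/ls1intum/Athena | modules/modeling/module_modeling_llm/module_modeling_llm/helpers/serializers/parser/relation.py | get_relation_arrow
-- ===== SOURCE A (Python) =====
-- def get_relation_arrow(relation_type: str) -> str:
--     """
--     Returns the correct arrow based on the relation type or flow type using string containment.
--
--     Parameters:
--     relation_type (str): The type of the relation (e.g., "ClassAggregation", "BPMNFlow_sequence").
--
--     Returns:
--     str: The arrow representation for the given relation type in Mermaid syntax.
--     """
--     arrow_map = {
--         # Keys sorted manually by length in descending order to ensure correct matching when using endswith, e.g., when we have dataassociation, dataassociation should be checked before association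
--         "interfacerequired": "--c",
--         "interfaceprovided": "--",
--         "dataassociation": "-->",
--         "generalization": "<|--",
--         "unidirectional": "-->",
--         "bidirectional": "<-->",
--         "association": "-->",
--         "inheritance": "<|--",
--         "composition": "*--",
--         "aggregation": "o--",
--         "realization": "..|>",
--         "dependency": "..>",
--         "sequence": "-->",
--         "message": "-->",
--         "include": "..>",
--         "message": "-->",
--         "extend": "-->",
--         "flow": "-->",
--         "link": "-->",
--         "arc": "-->",
--     }
--
--     relation_type = relation_type.replace(" ", "").lower()
--
--     for key, value in arrow_map.items():
--         if relation_type.endswith(key):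
--             return f"({relation_type}) {value}"
--
--     return f"-- {relation_type} --"
-- ===== SOURCE B (Python) =====
-- def get_relation_arrow(relation_type: str) -> str:
--     """
--     Returns the Mermaid arrow for a relation type: collect all arrow_map keys that
--     the normalized type ends with and pick the longest such suffix (order-independent),
--     instead of relying on a first-match scan over a manually length-sorted dict.
--     """
--     arrow_map = {
--         "interfacerequired": "--c",
--         "interfaceprovided": "--",
--         "dataassociation": "-->",
--         "generalization": "<|--",
--         "unidirectional": "-->",
--         "bidirectional": "<-->",
--         "association": "-->",
--         "inheritance": "<|--",
--         "composition": "*--",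
--         "aggregation": "o--",
--         "realization": "..|>",
--         "dependency": "..>",
--         "sequence": "-->",
--         "message": "-->",
--         "include": "..>",
--         "extend": "-->",
--         "flow": "-->",
--         "link": "-->",
--         "arc": "-->",
--     }
--     relation_type = relation_type.replace(" ", "").lower()
--     matches = [k for k in arrow_map if relation_type.endswith(k)]
--     if not matches:
--         return f"-- {relation_type} --"
--     best = max(matches, key=len)
--     return f"({relation_type}) {arrow_map[best]}"
-- ===== Notes on version B (the rewrite author's own statement) =====
-- stated objective: alternative
-- what changed: Replaces the order-dependent first-match early-return loop over a manually length-sorted dict with an order-independent collect-all-matching-suffixes comprehension followed by longest-suffix selection via max(key=len).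
import Mathlib
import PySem

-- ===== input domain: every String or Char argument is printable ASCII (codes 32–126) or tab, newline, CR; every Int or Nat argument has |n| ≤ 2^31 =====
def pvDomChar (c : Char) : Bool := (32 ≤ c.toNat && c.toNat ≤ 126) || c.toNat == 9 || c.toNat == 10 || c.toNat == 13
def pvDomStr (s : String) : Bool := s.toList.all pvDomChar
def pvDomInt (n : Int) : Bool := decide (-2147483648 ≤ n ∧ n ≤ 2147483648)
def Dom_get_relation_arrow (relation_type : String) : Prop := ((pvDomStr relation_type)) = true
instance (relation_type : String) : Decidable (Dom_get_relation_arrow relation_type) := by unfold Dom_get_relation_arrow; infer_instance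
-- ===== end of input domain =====

-- B replaces A's first-match early-return loop over the length-sorted dict with an
-- order-independent collect-all-matches-then-pick-longest-suffix selection (objective: alternative).

-- ===== PORT A =====
-- the arrow_map dict literal as an association list; the duplicate "message" key of the
-- Python literal collapses (dict semantics) to one entry at its first position, value "-->"
def pvArrowMap : List (String × String) := [
  ("interfacerequired", "--c"),
  ("interfaceprovided", "--"),
  ("dataassociation", "-->"),
  ("generalization", "<|--"),
  ("unidirectional", "-->"),
  ("bidirectional", "<-->"),
  ("association", "-->"),
  ("inheritance", "<|--"),
  ("composition", "*--"),
  ("aggregation", "o--"),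
  ("realization", "..|>"),
  ("dependency", "..>"),
  ("sequence", "-->"),
  ("message", "-->"),
  ("include", "..>"),
  ("extend", "-->"),
  ("flow", "-->"),
  ("link", "-->"),
  ("arc", "-->")]

-- A's for-loop with early return: first (key, value) whose key is a suffix of rt
def pvLoopA (rt : String) : List (String × String) → Option String
  | [] => none
  | (k, v) :: rest => if PySem.Str.endswith rt k then some v else pvLoopA rt rest

def get_relation_arrow (relation_type : String) : String :=
  let rt := PySem.Str.lower (PySem.Str.replace relation_type " " "")
  match pvLoopA rt pvArrowMap with
  | some v => "(" ++ rt ++ ") " ++ v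
  | none => "-- " ++ rt ++ " --"

-- ===== PORT B =====
-- Python's max(matches, key=len): fold keeping the first element of maximal length
def pvMaxLen (cur : String) : List String → String
  | [] => cur
  | k :: rest => pvMaxLen (if cur.length < k.length then k else cur) rest

-- arrow_map[best]: first-match lookup in the association list (best is always present)
def pvLookup (k : String) : List (String × String) → String
  | [] => ""
  | (k', v) :: rest => if k' == k then v else pvLookup k rest

def get_relation_arrow_alt (relation_type : String) : String :=
  let rt := PySem.Str.lower (PySem.Str.replace relation_type " " "")
  let mtchs := (pvArrowMap.map Prod.fst).filter (fun k => PySem.Str.endswith rt k)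
  match mtchs with
  | [] => "-- " ++ rt ++ " --"
  | m :: ms => "(" ++ rt ++ ") " ++ pvLookup (pvMaxLen m ms) pvArrowMap

-- ===== PRECONDITION & SPEC =====
def Spec_get_relation_arrow (relation_type : String) (out : String) : Prop := out = get_relation_arrow_alt relation_type
instance (relation_type : String) (out : String) : Decidable (Spec_get_relation_arrow relation_type out) := by unfold Spec_get_relation_arrow; infer_instance

-- ===== CLAIM (what is proved, stated in full; the proofs are below) =====
def Claim_equal_get_relation_arrow : Prop := ∀ (relation_type : String), Dom_get_relation_arrow relation_type → Spec_get_relation_arrow relation_type (get_relation_arrow relation_type)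

-- ===== LEMMAS AND PROOFS =====

-- if no later element is strictly longer, the max-by-length fold keeps its start value
theorem pvMaxLen_id (m : String) (ms : List String)
    (h : ∀ k ∈ ms, k.length ≤ m.length) : pvMaxLen m ms = m := by
  induction ms with
  | nil => rfl
  | cons k rest ih =>
    have hk : k.length ≤ m.length := h k (List.mem_cons_self ..)
    simp only [pvMaxLen, if_neg (by omega : ¬ m.length < k.length)]
    exact ih (fun x hx => h x (List.mem_cons_of_mem _ hx))

-- no key matches => A's loop returns none
theorem pvLoopA_none (rt : String) (l : List (String × String))
    (h : (l.map Prod.fst).filter (fun k => PySem.Str.endswith rt k) = []) :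
    pvLoopA rt l = none := by
  induction l with
  | nil => rfl
  | cons kv rest ih =>
    obtain ⟨k, v⟩ := kv
    rw [List.map_cons, List.filter_cons] at h
    by_cases hk : PySem.Str.endswith rt k = true
    · rw [if_pos hk] at h
      exact (List.cons_ne_nil _ _ h).elim
    · rw [if_neg hk] at h
      simp only [pvLoopA]
      rw [if_neg hk]
      exact ih h

-- first matching key m => A's loop returns exactly the first value associated to m
theorem pvLoopA_first (rt : String) (l : List (String × String)) (m : String) (ms : List String)
    (h : (l.map Prod.fst).filter (fun k => PySem.Str.endswith rt k) = m :: ms) :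
    pvLoopA rt l = some (pvLookup m l) := by
  induction l with
  | nil => exact (List.cons_ne_nil _ _ h.symm).elim
  | cons kv rest ih =>
    obtain ⟨k, v⟩ := kv
    rw [List.map_cons, List.filter_cons] at h
    by_cases hk : PySem.Str.endswith rt k = true
    · rw [if_pos hk] at h
      injection h with hm hms
      subst hm
      simp only [pvLoopA, pvLookup]
      rw [if_pos hk, beq_self_eq_true]
      simp only [if_true]
    · rw [if_neg hk] at h
      -- m is in the filter output, so m matches, hence m ≠ k
      have hm : PySem.Str.endswith rt m = true := by
        have hmem : m ∈ (rest.map Prod.fst).filter (fun k => PySem.Str.endswith rt k) :=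
          h ▸ List.mem_cons_self ..
        exact (List.mem_filter.mp hmem).2
      have hne : (k == m) = false :=
        beq_eq_false_iff_ne.mpr (fun he => hk (he ▸ hm))
      simp only [pvLoopA, pvLookup]
      rw [if_neg hk, hne]
      simp only [Bool.false_eq_true, if_false]
      exact ih h

-- every later match is no longer than the first match (keys are listed length-nonincreasing)
theorem pvFilter_lens (rt : String) (m : String) (ms : List String)
    (h : (pvArrowMap.map Prod.fst).filter (fun k => PySem.Str.endswith rt k) = m :: ms) :
    ∀ k ∈ ms, k.length ≤ m.length := by
  have hpw : (pvArrowMap.map Prod.fst).Pairwise (fun a b => b.length ≤ a.length) := by decide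
  have := hpw.filter (fun k => PySem.Str.endswith rt k)
  rw [h] at this
  exact (List.pairwise_cons.mp this).1

-- ===== VERDICT (by name: the statement is the Claim_ definition above) =====
theorem get_relation_arrow_spec : Claim_equal_get_relation_arrow := by
  intro x _
  show get_relation_arrow x = get_relation_arrow_alt x
  simp only [get_relation_arrow, get_relation_arrow_alt]
  generalize PySem.Str.lower (PySem.Str.replace x " " "") = rt
  cases hf : (pvArrowMap.map Prod.fst).filter (fun k => PySem.Str.endswith rt k) with
  | nil =>
    rw [pvLoopA_none rt _ hf]
  | cons m ms =>
    rw [pvLoopA_first rt _ m ms hf]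
    simp only
    rw [pvMaxLen_id m ms (pvFilter_lens rt m ms hf)]
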